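-- pv_equiv track=rewrite | github.com/EricCpy/AdventOfCode | 2023/Day13/solution.py | col_pattern
-- ===== SOURCE A (Python) =====
-- def col_pattern(pattern):
--     m = -1
--     for i in range(len(pattern[0]) - 1):
--         column_data1 = "".join([row[i] for row in pattern])
--         column_data2 = "".join([row[i + 1] for row in pattern])
--         if column_data1 == column_data2:
--             r = True
--             j = 0
--             while i - j - 1 >= 0 and i + 2 + j < len(pattern[0]):
--                 column_data1j = "".join([row[i -1 - j] for row in pattern])
--                 column_data2j = "".join([row[i + 2 + j] for row in pattern])
--                 if column_data1j != column_data2j: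
--                     r = False
--                     break
--                 j+=1
--
--             if r:
--                 m = max(m, i + 1)
--
--     return m
-- ===== SOURCE B (Python) =====
-- def col_pattern(pattern):
--     w = len(pattern[0])
--     candidates = set(range(1, w))
--     for row in pattern:
--         candidates = {i for i in candidates
--                       if all(row[i - 1 - t] == row[i + t]
--                              for t in range(min(i, w - i)))}
--     return max(candidates, default=-1)
-- ===== Notes on version B (the rewrite author's own statement) =====
-- stated objective: alternative
-- what changed: B never materialises columns: it keeps a set of candidate split positions and makes one pass over the ROWS, pruning each candidate by a per-row palindrome check around the split, then returns the maximum surviving candidate; A instead scans split positions, rebuilding column strings from the rows and expanding outward with a while loop for each split.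
import Mathlib
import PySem

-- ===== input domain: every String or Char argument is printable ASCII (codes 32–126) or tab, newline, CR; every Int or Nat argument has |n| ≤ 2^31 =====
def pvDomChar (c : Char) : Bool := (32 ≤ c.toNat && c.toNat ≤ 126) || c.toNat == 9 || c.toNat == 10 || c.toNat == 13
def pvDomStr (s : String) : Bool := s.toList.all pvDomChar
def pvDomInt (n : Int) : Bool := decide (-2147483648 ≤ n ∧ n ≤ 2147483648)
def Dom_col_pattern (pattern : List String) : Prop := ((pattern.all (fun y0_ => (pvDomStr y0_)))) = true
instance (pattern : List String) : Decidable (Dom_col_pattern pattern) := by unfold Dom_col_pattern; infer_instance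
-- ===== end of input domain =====

-- B keeps a shrinking set of candidate split positions and makes one pass over the ROWS,
-- pruning each candidate with a per-row palindrome check, instead of A's per-split column
-- rebuilding plus expand-from-centre while loop (objective: alternative).

-- ===== PORT A =====
-- "".join([row[idx] for row in pattern]) — a join of single-char strings is the list of those chars
def pvColA (pattern : List String) (idx : Int) : List Char :=
  pattern.map (fun row => (PySem.Str.pyGet? row idx).getD ' ')

-- the inner 'while i - j - 1 >= 0 and i + 2 + j < len(pattern[0])' loop; returns r
def pvWhileA (pattern : List String) (w i j : Int) : Bool :=
  if h : 0 ≤ i - j - 1 ∧ i + 2 + j < w then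
    if pvColA pattern (i - 1 - j) ≠ pvColA pattern (i + 2 + j) then false
    else pvWhileA pattern w i (j + 1)
  else true
termination_by (w - (i + 2 + j)).toNat
decreasing_by omega

def col_pattern (pattern : List String) : Int :=
  let w := PySem.Str.len ((PySem.List.pyGet? pattern 0).getD "")
  (PySem.List.pyRange 0 (w - 1) 1).foldl (fun m i =>
    if pvColA pattern i = pvColA pattern (i + 1) then
      if pvWhileA pattern w i 0 then max m (i + 1) else m
    else m) (-1)

-- ===== PORT B =====
-- all(row[i-1-t] == row[i+t] for t in range(min(i, w-i)))
def pvRowOk (row : String) (w i : Int) : Bool :=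
  (PySem.List.pyRange 0 (min i (w - i)) 1).all (fun t =>
    PySem.Str.pyGet? row (i - 1 - t) == PySem.Str.pyGet? row (i + t))

-- candidates start as set(range(1, w)); each row prunes them; return max(candidates, default=-1)
def col_pattern_alt (pattern : List String) : Int :=
  let w := PySem.Str.len ((PySem.List.pyGet? pattern 0).getD "")
  let cands := pattern.foldl (fun cs row => cs.filter (fun i => pvRowOk row w i))
      (PySem.List.pyRange 1 w 1)
  (PySem.List.max? cands (fun x => x)).getD (-1)

-- ===== PRECONDITION & SPEC =====
-- Pre_ excludes exactly the inputs where A raises: the empty list (pattern[0] is an IndexError) and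
-- patterns whose first row has length ≥ 2 while some row is shorter (row[i] raises during the scan).
def Pre_col_pattern (pattern : List String) : Prop :=
  pattern ≠ [] ∧
    (PySem.Str.len (pattern.headD "") ≤ 1 ∨
      ∀ row ∈ pattern, PySem.Str.len (pattern.headD "") ≤ PySem.Str.len row)
instance (pattern : List String) : Decidable (Pre_col_pattern pattern) := by
  unfold Pre_col_pattern; infer_instance
def pvWitness_col_pattern : List String := ["#..##..#", "..####..", "#......#"]

def Spec_col_pattern (pattern : List String) (out : Int) : Prop := out = col_pattern_alt pattern
instance (pattern : List String) (out : Int) : Decidable (Spec_col_pattern pattern out) := by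
  unfold Spec_col_pattern; infer_instance

-- ===== CLAIM (what is proved, stated in full; the proofs are below) =====
def Claim_equal_col_pattern : Prop := ∀ (pattern : List String), Dom_col_pattern pattern → Pre_col_pattern pattern → Spec_col_pattern pattern (col_pattern pattern)

-- ===== LEMMAS AND PROOFS =====
-- proof-only helper: column j of the pattern
def pvCol (pattern : List String) (j : Nat) : List Char :=
  (pattern.map String.toList).map (fun r => r.getD j ' ')

-- proof-only helper: the mirror-at-split-s property both conditions express
def pvV (pattern : List String) (wN s : Nat) : Prop :=
  ∀ t : Nat, t < s → t < wN - s → pvCol pattern (s - 1 - t) = pvCol pattern (s + t)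

lemma colA_eq (pattern : List String) (i : Int) (h : 0 ≤ i) :
    pvColA pattern i = pvCol pattern i.toNat := by
  simp only [pvColA, pvCol, List.map_map]
  refine List.map_congr_left (fun row _ => ?_)
  simp [PySem.Str.pyGet?, PySem.List.pyGet?_of_nonneg _ h, List.getD, Function.comp]

lemma whileA_char_fuel (p : List String) (w i : Int) :
    ∀ fuel : Nat, ∀ j : Int, (w - (i + 2 + j)).toNat ≤ fuel →
      (pvWhileA p w i j = true ↔
        ∀ t : Int, j ≤ t → 0 ≤ i - t - 1 → i + 2 + t < w →
          pvColA p (i - 1 - t) = pvColA p (i + 2 + t)) := by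
  intro fuel
  induction fuel with
  | zero =>
    intro j hf
    rw [pvWhileA, dif_neg (by omega)]
    refine iff_of_true rfl ?_
    intro t ht h1 h2
    exact absurd h2 (by omega)
  | succ fuel ih =>
    intro j hf
    rw [pvWhileA]
    by_cases hg : 0 ≤ i - j - 1 ∧ i + 2 + j < w
    · rw [dif_pos hg]
      by_cases he : pvColA p (i - 1 - j) = pvColA p (i + 2 + j)
      · rw [if_neg (by simp [he]), ih (j + 1) (by omega)]
        constructor
        · intro h t ht h1 h2
          by_cases htj : t = j
          · subst htj; exact he
          · exact h t (by omega) h1 h2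
        · intro h t ht h1 h2
          exact h t (by omega) h1 h2
      · rw [if_pos (by simp [he])]
        refine iff_of_false (by simp) ?_
        intro hAll
        exact he (hAll j le_rfl (by omega) (by omega))
    · rw [dif_neg hg]
      refine iff_of_true rfl ?_
      intro t ht h1 h2
      exact absurd (And.intro (show (0:Int) ≤ i - j - 1 by omega) (show i + 2 + j < w by omega)) hg

lemma whileA_char (p : List String) (w i j : Int) :
    pvWhileA p w i j = true ↔
      ∀ t : Int, j ≤ t → 0 ≤ i - t - 1 → i + 2 + t < w →
        pvColA p (i - 1 - t) = pvColA p (i + 2 + t) :=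
  whileA_char_fuel p w i ((w - (i + 2 + j)).toNat) j le_rfl

-- A's per-split condition (adjacent columns equal + while loop) expresses pvV at split k+1
lemma Acond_iff (p : List String) (wN k : Nat) (hk : k < wN - 1) :
    ((pvColA p (k : Int) = pvColA p ((k : Int) + 1)) ∧ pvWhileA p (wN : Int) (k : Int) 0 = true)
      ↔ pvV p wN (k + 1) := by
  unfold pvV
  rw [colA_eq p _ (by positivity), colA_eq p _ (by positivity), whileA_char]
  constructor
  · rintro ⟨h0, hw⟩ t ht1 ht2
    match t with
    | 0 =>
      simpa using h0
    | Nat.succ t' =>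
      have h := hw (t' : Int) (by omega) (by omega) (by omega)
      rw [colA_eq p _ (by omega), colA_eq p _ (by omega)] at h
      have e1 : ((k : Int) - 1 - t').toNat = k + 1 - 1 - (t' + 1) := by omega
      have e2 : ((k : Int) + 2 + t').toNat = k + 1 + (t' + 1) := by omega
      rw [e1, e2] at h
      exact h
  · intro h
    constructor
    · have h0 := h 0 (by omega) (by omega)
      simpa using h0
    · intro t ht h1 h2
      have h' := h (t.toNat + 1) (by omega) (by omega)
      rw [colA_eq p _ (by omega), colA_eq p _ (by omega)]
      have e1 : ((k : Int) - 1 - t).toNat = k + 1 - 1 - (t.toNat + 1) := by omega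
      have e2 : ((k : Int) + 2 + t).toNat = k + 1 + (t.toNat + 1) := by omega
      rw [e1, e2]
      exact h'

-- B's row-by-row pruning is one filter by the conjunction of the per-row tests
lemma filter_foldl {α : Type} (rows : List String) (P : String → α → Bool) :
    ∀ cs0 : List α,
      rows.foldl (fun cs row => cs.filter (P row)) cs0
        = cs0.filter (fun i => rows.all (fun row => P row i)) := by
  induction rows with
  | nil => intro cs0; simp
  | cons r rs ih =>
    intro cs0
    rw [List.foldl_cons, ih, List.filter_filter]
    refine List.filter_congr (fun i _ => ?_)
    simp [Bool.and_comm]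

lemma pyGet?_eq_getD (row : String) (idx : Int) (h0 : 0 ≤ idx)
    (h1 : idx < (row.toList.length : Int)) :
    PySem.Str.pyGet? row idx = some (row.toList.getD idx.toNat ' ') := by
  simp [PySem.Str.pyGet?, PySem.List.pyGet?_of_nonneg _ h0, List.getD,
    List.getElem?_eq_getElem (by omega : idx.toNat < row.toList.length)]

-- B's surviving-candidate test expresses pvV
lemma rowOk_iff (p : List String) (wN s : Nat) (hs1 : 1 ≤ s) (hs2 : s < wN)
    (hrows : ∀ row ∈ p, wN ≤ row.toList.length) :
    (p.all (fun row => pvRowOk row (wN : Int) (s : Int)) = true) ↔ pvV p wN s := by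
  unfold pvRowOk pvV
  simp only [List.all_eq_true, PySem.List.mem_pyRange_one, beq_iff_eq]
  constructor
  · intro h t ht1 ht2
    unfold pvCol
    simp only [List.map_map]
    refine List.map_congr_left (fun row hrow => ?_)
    have hlen := hrows row hrow
    have h' := h row hrow (t : Int) ⟨by omega, by omega⟩
    rw [pyGet?_eq_getD _ _ (by omega) (by omega),
        pyGet?_eq_getD _ _ (by omega) (by omega)] at h'
    have e1 : ((s : Int) - 1 - t).toNat = s - 1 - t := by omega
    have e2 : ((s : Int) + t).toNat = s + t := by omega
    rw [e1, e2] at h'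
    simpa [Function.comp] using Option.some.inj h'
  · intro h row hrow t ⟨ht0, htm⟩
    have hlen := hrows row hrow
    have h' := h t.toNat (by omega) (by omega)
    unfold pvCol at h'
    simp only [List.map_map] at h'
    have hpt : row.toList.getD (s - 1 - t.toNat) ' ' = row.toList.getD (s + t.toNat) ' ' := by
      have := List.map_inj_left.1 h' row hrow
      simpa [Function.comp] using this
    rw [pyGet?_eq_getD _ _ (by omega) (by omega),
        pyGet?_eq_getD _ _ (by omega) (by omega)]
    have e1 : ((s : Int) - 1 - t).toNat = s - 1 - t.toNat := by omega
    have e2 : ((s : Int) + t).toNat = s + t.toNat := by omega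
    rw [e1, e2]
    exact congrArg some hpt

lemma foldl_max_eq (l : List Int) : ∀ a : Int,
    l.foldl max a = max a ((PySem.List.max? l (fun x => x)).getD a) := by
  induction l with
  | nil => intro a; simp [PySem.List.max?]
  | cons x t ih =>
    intro a
    rw [List.foldl_cons, ih (max a x), PySem.List.max?_id_cons]
    cases ht : PySem.List.max? t (fun x => x) with
    | none =>
      have htn : t = [] := (PySem.List.max?_eq_none_iff _ _).1 ht
      subst htn
      simp
    | some m =>
      have hfold : t.foldl max x = max x m := by
        rw [ih x, ht]; rfl
      simp only [Option.getD_some, hfold, max_assoc]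

-- the foldl-with-condition over range(len-1) (A) equals foldl max over the filtered shifted range (B)
lemma bridge (CA CB : Int → Bool) :
    ∀ (fuel : Nat) (a b acc : Int), (b - a).toNat ≤ fuel →
      (∀ i, a ≤ i → i < b → CA i = CB (i + 1)) →
      (PySem.List.pyRange a b 1).foldl (fun m i => if CA i then max m (i + 1) else m) acc
        = ((PySem.List.pyRange (a + 1) (b + 1) 1).filter CB).foldl max acc := by
  intro fuel
  induction fuel with
  | zero =>
    intro a b acc hf _
    rw [PySem.List.pyRange_one_eq_nil (by omega), PySem.List.pyRange_one_eq_nil (by omega)]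
    rfl
  | succ fuel ih =>
    intro a b acc hf hcond
    by_cases hab : a < b
    · rw [PySem.List.pyRange_one_cons hab,
        PySem.List.pyRange_one_cons (a := a + 1) (b := b + 1) (by omega),
        List.foldl_cons, List.filter_cons]
      have hc := hcond a le_rfl hab
      cases hCA : CA a with
      | true =>
        have hcb : CB (a + 1) = true := hc ▸ hCA
        rw [if_pos rfl, hcb, if_pos rfl, List.foldl_cons]
        exact ih (a + 1) b (max acc (a + 1)) (by omega)
          (fun i h1 h2 => hcond i (by omega) h2)
      | false =>
        have hcb : CB (a + 1) = false := hc ▸ hCA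
        rw [if_neg (by simp), hcb, if_neg (by simp)]
        exact ih (a + 1) b acc (by omega) (fun i h1 h2 => hcond i (by omega) h2)
    · rw [PySem.List.pyRange_one_eq_nil (by omega),
        PySem.List.pyRange_one_eq_nil (a := a + 1) (b := b + 1) (by omega)]
      rfl

-- ===== VERDICT (by name: the statement is the Claim_ definition above) =====
theorem col_pattern_spec : Claim_equal_col_pattern := by
  unfold Claim_equal_col_pattern
  intro pattern _ hpre
  unfold Spec_col_pattern
  obtain ⟨hne, hpre2⟩ := hpre
  obtain ⟨r, rest, rfl⟩ : ∃ r rest, pattern = r :: rest := by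
    cases pattern with
    | nil => exact absurd rfl hne
    | cons r rest => exact ⟨r, rest, rfl⟩
  have hw : PySem.Str.len ((PySem.List.pyGet? (r :: rest) 0).getD "") = (r.length : Int) := by
    simp [PySem.Str.len]
  have hrows : 2 ≤ r.length → ∀ row ∈ r :: rest, r.length ≤ row.toList.length := by
    intro h2 row hrow
    rcases hpre2 with h1 | hall
    · exfalso
      simp only [List.headD_cons] at h1
      simp [PySem.Str.len] at h1
      omega
    · have := hall row hrow
      simp only [List.headD_cons] at this
      simp [PySem.Str.len] at this
      have := String.length_toList (s := row)
      omega
  -- the two boolean per-split conditions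
  set CA : Int → Bool := fun i =>
    (pvColA (r :: rest) i == pvColA (r :: rest) (i + 1))
      && pvWhileA (r :: rest) (r.length : Int) i 0 with hCA
  set CB : Int → Bool := fun i =>
    (r :: rest).all (fun row => pvRowOk row (r.length : Int) i) with hCB
  have hcond : ∀ i : Int, 0 ≤ i → i < (r.length : Int) - 1 → CA i = CB (i + 1) := by
    intro i h0 h1
    have hk : ((i.toNat : Int)) = i := Int.toNat_of_nonneg h0
    have hklt : i.toNat < r.length - 1 := by omega
    have hAiff := Acond_iff (r :: rest) r.length i.toNat hklt
    have hBiff := rowOk_iff (r :: rest) r.length (i.toNat + 1) (by omega) (by omega)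
      (hrows (by omega))
    have e1 : ((i.toNat + 1 : Nat) : Int) = i + 1 := by omega
    rw [e1] at hBiff
    have hA' : CA i = true ↔ pvV (r :: rest) r.length (i.toNat + 1) := by
      rw [hCA]
      simp only [Bool.and_eq_true, beq_iff_eq]
      rw [← hk]
      exact hAiff
    have hB' : CB (i + 1) = true ↔ pvV (r :: rest) r.length (i.toNat + 1) := hBiff
    exact Bool.coe_iff_coe.mp (hA'.trans hB'.symm)
  have hA : col_pattern (r :: rest)
      = ((PySem.List.pyRange 1 (r.length : Int) 1).filter CB).foldl max (-1) := by
    unfold col_pattern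
    dsimp only
    rw [hw]
    have hbody : (fun (m i : Int) =>
        if pvColA (r :: rest) i = pvColA (r :: rest) (i + 1) then
          if pvWhileA (r :: rest) (r.length : Int) i 0 then max m (i + 1) else m
        else m)
        = fun (m i : Int) => if CA i then max m (i + 1) else m := by
      funext m i
      rw [hCA]
      by_cases h1 : pvColA (r :: rest) i = pvColA (r :: rest) (i + 1) <;>
        by_cases h2 : pvWhileA (r :: rest) (r.length : Int) i 0 = true <;>
          simp [h1, h2]
    rw [hbody]
    have := bridge CA CB (((r.length : Int) - 1) - 0).toNat 0
      ((r.length : Int) - 1) (-1) le_rfl (fun i ha hb => hcond i ha hb)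
    rw [this]
    norm_num
  have hB : col_pattern_alt (r :: rest)
      = (PySem.List.max? ((PySem.List.pyRange 1 (r.length : Int) 1).filter CB)
          (fun x => x)).getD (-1) := by
    unfold col_pattern_alt
    dsimp only
    rw [hw, filter_foldl]
  rw [hA]
  rw [hB]
  rw [foldl_max_eq]
  cases hm : PySem.List.max? ((PySem.List.pyRange 1 (r.length : Int) 1).filter CB)
      (fun x => x) with
  | none => simp
  | some m =>
    have hmem := PySem.List.max?_mem hm
    have hmem2 : m ∈ PySem.List.pyRange 1 (r.length : Int) 1 := (List.mem_filter.1 hmem).1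
    have h1m : 1 ≤ m := (PySem.List.mem_pyRange_one.1 hmem2).1
    simp only [Option.getD_some]
    omega
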